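-- pv_equiv track=rewrite | github.com/qa-chrisb/godot-bevy | scripts/generate_godot_types.py | categorize_types_by_hierarchy
-- ===== SOURCE A (Python) =====
-- def categorize_types_by_hierarchy(node_types, parent_map):
--     """Categorize node types by their inheritance hierarchy"""
--
--     def is_descendant_of(node_type, ancestor):
--         current = node_type
--         while current in parent_map:
--             current = parent_map[current]
--             if current == ancestor:
--                 return True
--         return False
--
--     categories = {
--         "3d": [],
--         "2d": [],
--         "control": [],
--         "universal": []
--     }
--
--     for node_type in node_types:
--         if is_descendant_of(node_type, "Node3D"):
--             categories["3d"].append(node_type)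
--         elif is_descendant_of(node_type, "Node2D"):
--             categories["2d"].append(node_type)
--         elif is_descendant_of(node_type, "Control"):
--             categories["control"].append(node_type)
--         elif parent_map.get(node_type) == "Node":
--             categories["universal"].append(node_type)
--
--     return categories
-- ===== SOURCE B (Python) =====
-- def categorize_types_by_hierarchy(node_types, parent_map):
--     """Categorize node types by their inheritance hierarchy (memoized single chain walk)"""
--
--     # memo: type -> (has Node3D ancestor, has Node2D ancestor, has Control ancestor)
--     memo = {}
--
--     def flags(t):
--         path = []
--         cur = t
--         while cur not in memo:
--             p = parent_map.get(cur)
--             if p is None: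
--                 memo[cur] = (False, False, False)
--                 break
--             path.append((cur, p))
--             cur = p
--         for node, p in reversed(path):
--             f3, f2, fc = memo[p]
--             memo[node] = (f3 or p == "Node3D", f2 or p == "Node2D", fc or p == "Control")
--         return memo[t]
--
--     categories = {"3d": [], "2d": [], "control": [], "universal": []}
--     for t in node_types:
--         f3, f2, fc = flags(t)
--         if f3:
--             categories["3d"].append(t)
--         elif f2:
--             categories["2d"].append(t)
--         elif fc:
--             categories["control"].append(t)
--         elif parent_map.get(t) == "Node":
--             categories["universal"].append(t)
--     return categories
-- ===== Notes on version B (the rewrite author's own statement) =====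
-- stated objective: alternative
-- what changed: A re-walks each node's parent chain up to three times (once per candidate ancestor, early-exit); B walks each chain once and memoizes the (Node3D,Node2D,Control)-ancestor flag triple per type in a dict, so shared chain suffixes are never re-walked; on the generator's shallow-chain inputs the memo bookkeeping costs about as much as it saves.
import Mathlib
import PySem

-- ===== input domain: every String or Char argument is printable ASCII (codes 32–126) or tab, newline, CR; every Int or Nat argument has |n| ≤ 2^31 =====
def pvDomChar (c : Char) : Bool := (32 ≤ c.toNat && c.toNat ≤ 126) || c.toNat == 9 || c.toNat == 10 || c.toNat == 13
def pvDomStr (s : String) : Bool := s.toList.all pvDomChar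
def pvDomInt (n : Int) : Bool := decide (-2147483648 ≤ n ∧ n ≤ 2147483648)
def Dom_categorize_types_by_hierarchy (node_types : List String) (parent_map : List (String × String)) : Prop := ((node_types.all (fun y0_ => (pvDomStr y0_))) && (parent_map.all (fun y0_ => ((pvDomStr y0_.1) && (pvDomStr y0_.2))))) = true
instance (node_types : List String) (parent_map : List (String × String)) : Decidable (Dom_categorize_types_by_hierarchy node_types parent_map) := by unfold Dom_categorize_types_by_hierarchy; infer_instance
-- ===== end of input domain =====

-- B replaces A's three early-exit chain re-walks per node by ONE chain walk per node with a
-- memoized (Node3D/Node2D/Control)-ancestor flag triple per type, shared across all nodes.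

-- dict lookup parent_map.get(k) / 'k in parent_map' (assoc list, first match)
def pvGet (pm : List (String × String)) (k : String) : Option String :=
  (pm.find? (fun kv => kv.1 == k)).map (fun kv => kv.2)

-- ===== PORT A =====
-- while current in parent_map: current = parent_map[current]; if current == ancestor: return True
-- fuel = parent_map.length + 1 bounds the loop on every input admitted by Pre_ (acyclic chain
-- visits distinct keys of parent_map, so it exits within parent_map.length steps).
def isDescA (pm : List (String × String)) : Nat → String → String → Bool
  | 0, _, _ => false
  | Nat.succ n, cur, anc =>
    match pvGet pm cur with
    | none => false
    | some p => if p == anc then true else isDescA pm n p anc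

def categorize_types_by_hierarchy (node_types : List String) (parent_map : List (String × String)) : List (String × List String) :=
  let fuel := parent_map.length + 1
  let r := node_types.foldl (fun (acc : List String × List String × List String × List String) t =>
    if isDescA parent_map fuel t "Node3D" then (acc.1 ++ [t], acc.2.1, acc.2.2.1, acc.2.2.2)
    else if isDescA parent_map fuel t "Node2D" then (acc.1, acc.2.1 ++ [t], acc.2.2.1, acc.2.2.2)
    else if isDescA parent_map fuel t "Control" then (acc.1, acc.2.1, acc.2.2.1 ++ [t], acc.2.2.2)
    else if pvGet parent_map t == some "Node" then (acc.1, acc.2.1, acc.2.2.1, acc.2.2.2 ++ [t])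
    else acc) ([], [], [], [])
  [("3d", r.1), ("2d", r.2.1), ("control", r.2.2.1), ("universal", r.2.2.2)]

-- ===== PORT B =====
-- memo : type -> (has Node3D ancestor, has Node2D ancestor, has Control ancestor)
-- the 'while cur not in memo' loop of flags(): collects the (node, parent) path, stops at a
-- memoized type or (inserting a (False,False,False) base entry) at a type with no parent
def bWalk (pm : List (String × String)) : Nat → PySem.Dict String (Bool × Bool × Bool) → String →
    List (String × String) × PySem.Dict String (Bool × Bool × Bool)
  | 0, memo, _ => ([], memo)
  | Nat.succ n, memo, cur =>
    if (memo.get? cur).isSome then ([], memo)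
    else
      match pvGet pm cur with
      | none => ([], memo.insert cur (false, false, false))
      | some p =>
        let r := bWalk pm n memo p
        ((cur, p) :: r.1, r.2)

-- memo[node] = (f3 or p == "Node3D", f2 or p == "Node2D", fc or p == "Control")
def bCombine (f : Bool × Bool × Bool) (p : String) : Bool × Bool × Bool :=
  (f.1 || (p == "Node3D"), f.2.1 || (p == "Node2D"), f.2.2 || (p == "Control"))

-- the 'for node, p in reversed(path)' fill loop
def bFill (memo : PySem.Dict String (Bool × Bool × Bool)) (path : List (String × String)) :
    PySem.Dict String (Bool × Bool × Bool) :=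
  path.foldl (fun m np => m.insert np.1 (bCombine (m.getD np.2 (false, false, false)) np.2)) memo

-- flags(t): walk once, fill memo bottom-up, read memo[t]
def bFlags (pm : List (String × String)) (memo : PySem.Dict String (Bool × Bool × Bool)) (t : String) :
    (Bool × Bool × Bool) × PySem.Dict String (Bool × Bool × Bool) :=
  let r := bWalk pm (pm.length + 1) memo t
  let m2 := bFill r.2 r.1.reverse
  (m2.getD t (false, false, false), m2)

def categorize_types_by_hierarchy_alt (node_types : List String) (parent_map : List (String × String)) : List (String × List String) :=
  let r := node_types.foldl (fun (st : PySem.Dict String (Bool × Bool × Bool) × List String × List String × List String × List String) t =>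
    let fr := bFlags parent_map st.1 t
    if fr.1.1 then (fr.2, st.2.1 ++ [t], st.2.2.1, st.2.2.2.1, st.2.2.2.2)
    else if fr.1.2.1 then (fr.2, st.2.1, st.2.2.1 ++ [t], st.2.2.2.1, st.2.2.2.2)
    else if fr.1.2.2 then (fr.2, st.2.1, st.2.2.1, st.2.2.2.1 ++ [t], st.2.2.2.2)
    else if pvGet parent_map t == some "Node" then (fr.2, st.2.1, st.2.2.1, st.2.2.2.1, st.2.2.2.2 ++ [t])
    else (fr.2, st.2.1, st.2.2.1, st.2.2.2.1, st.2.2.2.2)) (PySem.Dict.empty, [], [], [], [])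
  [("3d", r.2.1), ("2d", r.2.2.1), ("control", r.2.2.2.1), ("universal", r.2.2.2.2)]

-- ===== PRECONDITION & SPEC =====
def pvStep (pm : List (String × String)) (s : String) : String := (pvGet pm s).getD s

def pvIter (pm : List (String × String)) : Nat → String → String
  | 0, s => s
  | Nat.succ n, s => pvIter pm n (pvStep pm s)

-- Pre_ excludes exactly the inputs on which A never returns: some node_type's parent chain is
-- cyclic, so A's 'while current in parent_map' loop runs forever (an acyclic chain leaves the
-- key set of parent_map within parent_map.length steps).
def Pre_categorize_types_by_hierarchy (node_types : List String) (parent_map : List (String × String)) : Prop :=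
  ∀ t ∈ node_types, ∃ i ∈ List.range (parent_map.length + 1), pvGet parent_map (pvIter parent_map i t) = none

instance (node_types : List String) (parent_map : List (String × String)) : Decidable (Pre_categorize_types_by_hierarchy node_types parent_map) := by unfold Pre_categorize_types_by_hierarchy; infer_instance

def pvWitness_categorize_types_by_hierarchy : List String × (List (String × String)) :=
  (["Sprite2D", "Camera3D", "Timer", "Label"],
   [("Sprite2D", "Node2D"), ("Node2D", "CanvasItem"), ("CanvasItem", "Node"),
    ("Camera3D", "Node3D"), ("Node3D", "Node"), ("Timer", "Node"),
    ("Label", "Control"), ("Control", "CanvasItem")])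

def Spec_categorize_types_by_hierarchy (node_types : List String) (parent_map : List (String × String)) (out : List (String × List String)) : Prop := out = categorize_types_by_hierarchy_alt node_types parent_map
instance (node_types : List String) (parent_map : List (String × String)) (out : List (String × List String)) : Decidable (Spec_categorize_types_by_hierarchy node_types parent_map out) := by unfold Spec_categorize_types_by_hierarchy; infer_instance

-- ===== CLAIM (what is proved, stated in full; the proofs are below) =====
def Claim_equal_categorize_types_by_hierarchy : Prop := ∀ (node_types : List String) (parent_map : List (String × String)), Dom_categorize_types_by_hierarchy node_types parent_map → Pre_categorize_types_by_hierarchy node_types parent_map → Spec_categorize_types_by_hierarchy node_types parent_map (categorize_types_by_hierarchy node_types parent_map)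

-- ===== LEMMAS AND PROOFS =====

-- the chain from t leaves parent_map's key set within parent_map.length steps
def pvTerm (pm : List (String × String)) (t : String) : Prop :=
  ∃ i < pm.length + 1, pvGet pm (pvIter pm i t) = none

-- the ancestor-flag triple of a type, computed with enough fuel
def sflags (pm : List (String × String)) : Nat → String → Bool × Bool × Bool
  | 0, _ => (false, false, false)
  | Nat.succ n, cur =>
    match pvGet pm cur with
    | none => (false, false, false)
    | some p => bCombine (sflags pm n p) p

def pvFlags (pm : List (String × String)) (t : String) : Bool × Bool × Bool :=
  sflags pm (pm.length + 1) t

-- every memo entry is the true flag triple of a terminating type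
def pvGood (pm : List (String × String)) (memo : PySem.Dict String (Bool × Bool × Bool)) : Prop :=
  ∀ k f, memo.get? k = some f → pvTerm pm k ∧ f = pvFlags pm k

lemma isDescA_eq_sflags (pm : List (String × String)) :
    ∀ (n : Nat) (cur : String),
      isDescA pm n cur "Node3D" = (sflags pm n cur).1 ∧
      isDescA pm n cur "Node2D" = (sflags pm n cur).2.1 ∧
      isDescA pm n cur "Control" = (sflags pm n cur).2.2 := by
  intro n
  induction n with
  | zero => intro cur; simp [isDescA, sflags]
  | succ n ih =>
    intro cur
    cases h : pvGet pm cur with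
    | none => simp [isDescA, sflags, h]
    | some p =>
      obtain ⟨h1, h2, h3⟩ := ih p
      simp only [isDescA, sflags, h, bCombine]
      refine ⟨?_, ?_, ?_⟩ <;>
        · split <;> simp_all [Bool.or_comm]

lemma sflags_stable (pm : List (String × String)) :
    ∀ (n m : Nat) (cur : String), n ≤ m →
      (∃ i < n, pvGet pm (pvIter pm i cur) = none) →
      sflags pm n cur = sflags pm m cur := by
  intro n
  induction n with
  | zero => intro m cur _ h; exact absurd h (by simp)
  | succ n ih =>
    intro m cur hle ⟨i, hi, hnone⟩
    obtain ⟨m', rfl⟩ : ∃ m', m = m' + 1 := ⟨m - 1, by omega⟩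
    cases h : pvGet pm cur with
    | none => simp [sflags, h]
    | some p =>
      obtain ⟨j, rfl⟩ : ∃ j, i = j + 1 := by
        cases i with
        | zero => simp [pvIter, h] at hnone
        | succ j => exact ⟨j, rfl⟩
      have hstep : pvStep pm cur = p := by simp [pvStep, h]
      have hj : pvGet pm (pvIter pm j p) = none := by
        simpa [pvIter, hstep] using hnone
      have := ih m' p (by omega) ⟨j, by omega, hj⟩
      simp [sflags, h, this]

lemma pvFlags_parent (pm : List (String × String)) (cur p : String)
    (h : pvGet pm cur = some p) (ht : pvTerm pm cur) :
    pvFlags pm cur = bCombine (pvFlags pm p) p := by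
  obtain ⟨i, hi, hnone⟩ := ht
  obtain ⟨j, rfl⟩ : ∃ j, i = j + 1 := by
    cases i with
    | zero => simp [pvIter, h] at hnone
    | succ j => exact ⟨j, rfl⟩
  have hstep : pvStep pm cur = p := by simp [pvStep, h]
  have hj : pvGet pm (pvIter pm j p) = none := by
    simpa [pvIter, hstep] using hnone
  have hstab : sflags pm pm.length p = sflags pm (pm.length + 1) p :=
    sflags_stable pm pm.length (pm.length + 1) p (by omega) ⟨j, by omega, hj⟩
  simp [pvFlags, sflags, h, hstab]

lemma bFill_append (memo : PySem.Dict String (Bool × Bool × Bool))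
    (l : List (String × String)) (np : String × String) :
    bFill memo (l ++ [np]) =
      (bFill memo l).insert np.1 (bCombine ((bFill memo l).getD np.2 (false, false, false)) np.2) := by
  simp [bFill]

lemma bWalk_fill_spec (pm : List (String × String)) :
    ∀ (fuel : Nat) (memo : PySem.Dict String (Bool × Bool × Bool)) (cur : String),
      pvGood pm memo →
      (∃ i < fuel, i < pm.length + 1 ∧ pvGet pm (pvIter pm i cur) = none) →
      pvGood pm (bFill (bWalk pm fuel memo cur).2 (bWalk pm fuel memo cur).1.reverse) ∧
      (bFill (bWalk pm fuel memo cur).2 (bWalk pm fuel memo cur).1.reverse).get? cur =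
        some (pvFlags pm cur) := by
  intro fuel
  induction fuel with
  | zero => intro memo cur _ h; exact absurd h (by simp)
  | succ n ih =>
    intro memo cur hgood ⟨i, hfuel, hlen, hnone⟩
    by_cases hmem : (memo.get? cur).isSome
    · obtain ⟨f, hf⟩ := Option.isSome_iff_exists.mp hmem
      have := (hgood cur f hf).2
      simp only [bWalk, hmem, if_pos, List.reverse_nil, bFill, List.foldl_nil]
      exact ⟨hgood, by rw [hf, this]⟩
    · cases h : pvGet pm cur with
      | none =>
        simp only [bWalk, hmem, if_neg, Bool.false_eq_true, not_false_eq_true, h,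
          List.reverse_nil, bFill, List.foldl_nil]
        have hflags : pvFlags pm cur = (false, false, false) := by
          simp [pvFlags, sflags, h]
        constructor
        · intro k f hk
          rw [PySem.Dict.get?_insert] at hk
          by_cases hkc : k = cur
          · subst hkc
            simp at hk
            exact ⟨⟨0, by omega, by simpa [pvIter] using h⟩, by simp [← hk, hflags]⟩
          · simp [hkc] at hk
            exact hgood k f hk
        · rw [PySem.Dict.get?_insert_self, hflags]
      | some p =>
        have hip : ∃ j < n, j < pm.length + 1 ∧ pvGet pm (pvIter pm j p) = none := by
          obtain ⟨j, rfl⟩ : ∃ j, i = j + 1 := by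
            cases i with
            | zero => simp [pvIter, h] at hnone
            | succ j => exact ⟨j, rfl⟩
          have hstep : pvStep pm cur = p := by simp [pvStep, h]
          exact ⟨j, by omega, by omega, by simpa [pvIter, hstep] using hnone⟩
        obtain ⟨ihgood, ihget⟩ := ih memo p hgood hip
        -- unfold one step of bWalk and push the reverse through bFill
        have hrw : bWalk pm (n + 1) memo cur =
            ((cur, p) :: (bWalk pm n memo p).1, (bWalk pm n memo p).2) := by
          simp [bWalk, hmem, h]
        rw [hrw]
        simp only [List.reverse_cons]
        rw [bFill_append]
        set m2 := bFill (bWalk pm n memo p).2 (bWalk pm n memo p).1.reverse with hm2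
        have hgetD : m2.getD p (false, false, false) = pvFlags pm p :=
          PySem.Dict.getD_of_get?_eq_some m2 (false, false, false) ihget
        have hcurflags : bCombine (m2.getD p (false, false, false)) p = pvFlags pm cur := by
          rw [hgetD, ← pvFlags_parent pm cur p h ⟨i, hlen, hnone⟩]
        constructor
        · intro k f hk
          rw [PySem.Dict.get?_insert] at hk
          by_cases hkc : k = cur
          · subst hkc
            rw [if_pos rfl] at hk
            refine ⟨⟨i, hlen, hnone⟩, ?_⟩
            rw [← hcurflags]
            exact (Option.some.inj hk).symm
          · simp [hkc] at hk
            exact ihgood k f hk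
        · rw [PySem.Dict.get?_insert_self, hcurflags]

lemma bFlags_spec (pm : List (String × String)) (memo : PySem.Dict String (Bool × Bool × Bool))
    (t : String) (hgood : pvGood pm memo) (ht : pvTerm pm t) :
    (bFlags pm memo t).1 = pvFlags pm t ∧ pvGood pm (bFlags pm memo t).2 := by
  obtain ⟨i, hi, hnone⟩ := ht
  obtain ⟨hg, hget⟩ := bWalk_fill_spec pm (pm.length + 1) memo t hgood ⟨i, hi, hi, hnone⟩
  refine ⟨?_, hg⟩
  simp only [bFlags]
  exact PySem.Dict.getD_of_get?_eq_some _ (false, false, false) hget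

lemma fold_eq (pm : List (String × String)) :
    ∀ (l : List String) (memo : PySem.Dict String (Bool × Bool × Bool))
      (c3 c2 cc cu : List String),
      pvGood pm memo → (∀ t ∈ l, pvTerm pm t) →
      (l.foldl (fun (st : PySem.Dict String (Bool × Bool × Bool) × List String × List String × List String × List String) t =>
        let fr := bFlags pm st.1 t
        if fr.1.1 then (fr.2, st.2.1 ++ [t], st.2.2.1, st.2.2.2.1, st.2.2.2.2)
        else if fr.1.2.1 then (fr.2, st.2.1, st.2.2.1 ++ [t], st.2.2.2.1, st.2.2.2.2)
        else if fr.1.2.2 then (fr.2, st.2.1, st.2.2.1, st.2.2.2.1 ++ [t], st.2.2.2.2)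
        else if pvGet pm t == some "Node" then (fr.2, st.2.1, st.2.2.1, st.2.2.2.1, st.2.2.2.2 ++ [t])
        else (fr.2, st.2.1, st.2.2.1, st.2.2.2.1, st.2.2.2.2)) (memo, c3, c2, cc, cu)).2 =
      l.foldl (fun (acc : List String × List String × List String × List String) t =>
        if isDescA pm (pm.length + 1) t "Node3D" then (acc.1 ++ [t], acc.2.1, acc.2.2.1, acc.2.2.2)
        else if isDescA pm (pm.length + 1) t "Node2D" then (acc.1, acc.2.1 ++ [t], acc.2.2.1, acc.2.2.2)
        else if isDescA pm (pm.length + 1) t "Control" then (acc.1, acc.2.1, acc.2.2.1 ++ [t], acc.2.2.2)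
        else if pvGet pm t == some "Node" then (acc.1, acc.2.1, acc.2.2.1, acc.2.2.2 ++ [t])
        else acc) (c3, c2, cc, cu) := by
  intro l
  induction l with
  | nil => intro memo c3 c2 cc cu _ _; rfl
  | cons t l ih =>
    intro memo c3 c2 cc cu hgood hterm
    have ht : pvTerm pm t := hterm t (by simp)
    obtain ⟨hfl, hg2⟩ := bFlags_spec pm memo t hgood ht
    obtain ⟨h1, h2, h3⟩ := isDescA_eq_sflags pm (pm.length + 1) t
    simp only [List.foldl_cons]
    have e1 : (bFlags pm memo t).1.1 = isDescA pm (pm.length + 1) t "Node3D" := by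
      rw [hfl, h1]; rfl
    have e2 : (bFlags pm memo t).1.2.1 = isDescA pm (pm.length + 1) t "Node2D" := by
      rw [hfl, h2]; rfl
    have e3 : (bFlags pm memo t).1.2.2 = isDescA pm (pm.length + 1) t "Control" := by
      rw [hfl, h3]; rfl
    have hterm' : ∀ s ∈ l, pvTerm pm s := fun s hs => hterm s (by simp [hs])
    rw [e1, e2, e3]
    split_ifs <;> exact ih _ _ _ _ _ hg2 hterm'

-- ===== VERDICT (by name: the statement is the Claim_ definition above) =====
theorem categorize_types_by_hierarchy_spec : Claim_equal_categorize_types_by_hierarchy := by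
  intro node_types parent_map _ hpre
  unfold Spec_categorize_types_by_hierarchy
  unfold categorize_types_by_hierarchy categorize_types_by_hierarchy_alt
  have hgood : pvGood parent_map PySem.Dict.empty := by
    intro k f hk
    simp [PySem.Dict.get?_empty] at hk
  have hterm : ∀ t ∈ node_types, pvTerm parent_map t := by
    intro t ht
    obtain ⟨i, hi, hnone⟩ := hpre t ht
    exact ⟨i, by simpa using hi, hnone⟩
  have := fold_eq parent_map node_types PySem.Dict.empty [] [] [] [] hgood hterm
  simp only [this]
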